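-- pv_equiv track=rewrite | github.com/alexvic-che/animated-barnacle | Курсы/ООП python/3.5.5.py | delete_symbols
-- ===== SOURCE A (Python) =====
-- def delete_symbols(stich, chars = "–?!,.;"):
--     new_stich = []
--     for row in stich:
--         a = row
--         for el in chars:
--             a = a.replace(el, '')
--         new_stich.append(a)
--     n_n_s = []
--     for row in new_stich:
--         while row.count("  ")!=0:
--             row = row.replace("  ", " ")
--         n_n_s.append(row)
--     lst_words = []
--     for el in n_n_s:
--         lst_words.append(list(el.split()))
--
--     return lst_words
-- ===== SOURCE B (Python) =====
-- def delete_symbols(stich, chars = "–?!,.;"):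
--     removed = set(chars)
--     lst_words = []
--     for row in stich:
--         words = []
--         buf = []
--         for ch in row:
--             if ch in removed:
--                 continue
--             if ch.isspace():
--                 if buf:
--                     words.append(''.join(buf))
--                     buf = []
--             else:
--                 buf.append(ch)
--         if buf:
--             words.append(''.join(buf))
--         lst_words.append(words)
--     return lst_words
-- ===== Notes on version B (the rewrite author's own statement) =====
-- stated objective: faster
-- what changed: Replaces A's three full string-rewriting passes per row (one replace per punctuation char, a repeated double-space-collapse loop, then split) with a single character-level scan per row that skips removed characters, flushes a word buffer on whitespace, and never builds intermediate strings.
import Mathlib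
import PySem

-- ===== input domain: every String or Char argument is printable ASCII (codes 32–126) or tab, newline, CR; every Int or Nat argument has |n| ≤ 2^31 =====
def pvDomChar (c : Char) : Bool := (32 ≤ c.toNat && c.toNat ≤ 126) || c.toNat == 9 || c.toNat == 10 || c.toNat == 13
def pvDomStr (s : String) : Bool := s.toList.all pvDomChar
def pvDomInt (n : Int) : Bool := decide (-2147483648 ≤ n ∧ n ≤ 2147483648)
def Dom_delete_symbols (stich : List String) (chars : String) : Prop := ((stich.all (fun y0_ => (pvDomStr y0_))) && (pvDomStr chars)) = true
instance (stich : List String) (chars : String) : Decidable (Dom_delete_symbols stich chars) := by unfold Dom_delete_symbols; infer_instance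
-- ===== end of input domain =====

-- B replaces A's three string-rewriting passes (per-char replace, double-space collapse loop, split)
-- by a single character-level scan per row with a word buffer; same return value, fewer passes.


-- ===== PORT A =====
-- the `while row.count("  ") != 0: row = row.replace("  ", " ")` loop, fueled for totality;
-- each iteration strictly shrinks the string, so fuel = length is enough (the guard only makes it total)
def dsCollapse : Nat → String → String
  | 0, row => row
  | f + 1, row =>
      if PySem.Str.count row "  " ≠ 0 then dsCollapse f (PySem.Str.replace row "  " " ") else row

def delete_symbols (stich : List String) (chars : String) : List (List String) :=
  let new_stich := stich.map (fun row =>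
    chars.toList.foldl (fun a el => PySem.Str.replace a (String.ofList [el]) "") row)
  let n_n_s := new_stich.map (fun row => dsCollapse row.toList.length row)
  n_n_s.map (fun el => PySem.Str.split₀ el)

-- ===== PORT B =====
-- one step of the per-character scan: skip removed chars, whitespace flushes the buffer, else extend it
def dsStep (removed : List Char) (st : List String × List Char) (ch : Char) : List String × List Char :=
  if removed.contains ch then st
  else if PySem.Chars.isspace ch then
    (if st.2.isEmpty then st else (st.1 ++ [String.ofList st.2], []))
  else (st.1, st.2 ++ [ch])

def dsFinish (st : List String × List Char) : List String :=
  if st.2.isEmpty then st.1 else st.1 ++ [String.ofList st.2]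

def dsRowB (removed : List Char) (row : List Char) : List String :=
  dsFinish (row.foldl (dsStep removed) ([], []))

def delete_symbols_alt (stich : List String) (chars : String) : List (List String) :=
  let removed := PySem.Set.ofList chars.toList
  stich.map (fun row => dsRowB removed row.toList)

-- ===== PRECONDITION & SPEC =====
def Spec_delete_symbols (stich : List String) (chars : String) (out : List (List String)) : Prop := out = delete_symbols_alt stich chars
instance (stich : List String) (chars : String) (out : List (List String)) : Decidable (Spec_delete_symbols stich chars out) := by unfold Spec_delete_symbols; infer_instance

-- ===== CLAIM (what is proved, stated in full; the proofs are below) =====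
def Claim_equal_delete_symbols : Prop := ∀ (stich : List String) (chars : String), Dom_delete_symbols stich chars → Spec_delete_symbols stich chars (delete_symbols stich chars)

-- ===== LEMMAS AND PROOFS =====

-- split₀.go step equations
theorem go_space (c : Char) (rest cur : List Char) (acc : List (List Char))
    (h : PySem.Chars.isspace c = true) :
    PySem.Chars.split₀.go (c :: rest) cur acc
      = PySem.Chars.split₀.go rest [] (if cur.isEmpty then acc else cur.reverse :: acc) := by
  simp [PySem.Chars.split₀.go, h]; split <;> simp

theorem go_nonspace (c : Char) (rest cur : List Char) (acc : List (List Char))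
    (h : PySem.Chars.isspace c = false) :
    PySem.Chars.split₀.go (c :: rest) cur acc = PySem.Chars.split₀.go rest (c :: cur) acc := by
  simp [PySem.Chars.split₀.go, h]

-- replacing a single character by "" is filtering it out
theorem replace_go_single (e : Char) :
    ∀ (fuel : Nat) (l : List Char) (acc : List Char), l.length ≤ fuel →
      PySem.Chars.replace.go [e] [] fuel l acc
        = acc.reverse ++ l.filter (fun c => !(c == e)) := by
  intro fuel
  induction fuel with
  | zero =>
      intro l acc h
      have : l = [] := List.eq_nil_of_length_eq_zero (Nat.le_zero.mp h)
      subst this; simp [PySem.Chars.replace.go]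
  | succ f ih =>
      intro l acc h
      cases l with
      | nil => simp [PySem.Chars.replace.go]
      | cons c t =>
          by_cases hc : e = c
          · subst hc
            have hpre : List.isPrefixOf [e] (e :: t) = true := by simp [List.isPrefixOf]
            simp only [PySem.Chars.replace.go, hpre, if_true]
            have hlen : t.length ≤ f := by simp at h; omega
            simpa using ih t acc hlen
          · have hpre : List.isPrefixOf [e] (c :: t) = false := by
              simp [List.isPrefixOf]; exact fun h' => hc (by simpa using h')
            simp only [PySem.Chars.replace.go, hpre]
            rw [ih t (c :: acc) (by simpa using Nat.succ_le_succ_iff.mp (by simpa using h))]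
            simp [Ne.symm hc]

theorem replace_single (e : Char) (l : List Char) :
    PySem.Chars.replace l [e] [] = l.filter (fun c => !(c == e)) := by
  simpa using replace_go_single e l.length l [] le_rfl

-- the `for el in chars` loop of A filters out every character of chars
theorem foldl_filter (es : List Char) :
    ∀ (l : List Char),
      es.foldl (fun a e => a.filter (fun c => !(c == e))) l
        = l.filter (fun c => !es.contains c) := by
  induction es with
  | nil => intro l; simp
  | cons e es ih =>
      intro l
      simp only [List.foldl_cons, ih, List.filter_filter]
      apply List.filter_congr
      intro c _
      by_cases hc : c = e <;> simp [hc]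

theorem pass1_toList (es : List Char) :
    ∀ (row : String),
      (es.foldl (fun a el => PySem.Str.replace a (String.ofList [el]) "") row).toList
        = es.foldl (fun a e => a.filter (fun c => !(c == e))) row.toList := by
  induction es with
  | nil => intro row; simp
  | cons e es ih =>
      intro row
      simp only [List.foldl_cons, ih, PySem.Str.toList_replace]
      congr 1
      simpa using replace_single e row.toList

-- one pass of `row.replace("  ", " ")` as a structural recursion
def collapse1 : List Char → List Char
  | [] => []
  | [c] => [c]
  | c :: c' :: t =>
      if c = ' ' ∧ c' = ' ' then ' ' :: collapse1 t else c :: collapse1 (c' :: t)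

theorem replace_go_pair :
    ∀ (fuel : Nat) (l : List Char) (acc : List Char), l.length ≤ fuel →
      PySem.Chars.replace.go [' ', ' '] [' '] fuel l acc = acc.reverse ++ collapse1 l := by
  intro fuel
  induction fuel with
  | zero =>
      intro l acc h
      have : l = [] := List.eq_nil_of_length_eq_zero (Nat.le_zero.mp h)
      subst this; simp [PySem.Chars.replace.go, collapse1]
  | succ f ih =>
      intro l acc h
      cases l with
      | nil => simp [PySem.Chars.replace.go, collapse1]
      | cons c t =>
          cases t with
          | nil =>
              have hpre : List.isPrefixOf [' ', ' '] [c] = false := by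
                simp [List.isPrefixOf]
              simp only [PySem.Chars.replace.go, hpre]
              rw [ih [] (c :: acc) (by simp)]
              simp [collapse1]
          | cons c' t' =>
              by_cases hsp : c = ' ' ∧ c' = ' '
              · obtain ⟨h1, h2⟩ := hsp; subst h1; subst h2
                have hpre : List.isPrefixOf [' ', ' '] (' ' :: ' ' :: t') = true := by
                  simp [List.isPrefixOf]
                simp only [PySem.Chars.replace.go, hpre, if_true]
                have hlen : t'.length ≤ f := by simp at h; omega
                have := ih t' (' ' :: acc) hlen
                simp only [List.length_cons] at this ⊢
                simpa [collapse1] using this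
              · have hpre : List.isPrefixOf [' ', ' '] (c :: c' :: t') = false := by
                  rcases not_and_or.mp hsp with h1 | h1 <;> simp [List.isPrefixOf] <;> tauto
                simp only [PySem.Chars.replace.go, hpre]
                rw [ih (c' :: t') (c :: acc) (by simp at h ⊢; omega)]
                simp [collapse1, hsp]

theorem replace_pair (l : List Char) :
    PySem.Chars.replace l [' ', ' '] [' '] = collapse1 l := by
  simpa using replace_go_pair l.length l [] le_rfl

theorem isspace_space : PySem.Chars.isspace ' ' = true := by decide

-- collapsing double spaces does not change the word split
theorem go_collapse1 :
    ∀ (l : List Char) (cur : List Char) (acc : List (List Char)),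
      PySem.Chars.split₀.go (collapse1 l) cur acc = PySem.Chars.split₀.go l cur acc := by
  intro l
  induction l using collapse1.induct with
  | case1 => intro cur acc; simp [collapse1]
  | case2 c => intro cur acc; simp [collapse1]
  | case3 c c' t hsp ih =>
      obtain ⟨h1, h2⟩ := hsp; subst h1; subst h2
      intro cur acc
      have hcol : collapse1 (' ' :: ' ' :: t) = ' ' :: collapse1 t := by simp [collapse1]
      rw [hcol, go_space _ _ _ _ isspace_space, go_space _ _ _ _ isspace_space,
          go_space _ _ _ _ isspace_space, ih]
      simp
  | case4 c c' t hsp ih =>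
      intro cur acc
      simp only [collapse1, if_neg hsp]
      by_cases hc : PySem.Chars.isspace c = true
      · rw [go_space _ _ _ _ hc, go_space _ _ _ _ hc, ih]
      · rw [go_nonspace _ _ _ _ (eq_false_of_ne_true hc),
            go_nonspace _ _ _ _ (eq_false_of_ne_true hc), ih]

theorem split₀_collapse1 (l : List Char) :
    PySem.Chars.split₀ (collapse1 l) = PySem.Chars.split₀ l := by
  unfold PySem.Chars.split₀
  exact go_collapse1 l [] []

theorem split₀_dsCollapse :
    ∀ (fuel : Nat) (row : String),
      PySem.Chars.split₀ (dsCollapse fuel row).toList = PySem.Chars.split₀ row.toList := by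
  intro fuel
  induction fuel with
  | zero => intro row; rfl
  | succ f ih =>
      intro row
      simp only [dsCollapse]
      split
      · rw [ih]
        rw [PySem.Str.toList_replace]
        have h2 : ("  " : String).toList = [' ', ' '] := by decide
        have h1 : (" " : String).toList = [' '] := by decide
        rw [h2, h1, replace_pair, split₀_collapse1]
      · rfl

-- B's scan is split₀ of the row with the removed characters filtered out
theorem scan_eq (removed : List Char) :
    ∀ (cs buf : List Char) (acc : List (List Char)),
      (∀ c ∈ buf, PySem.Chars.isspace c = false) →
      dsFinish (cs.foldl (dsStep removed) (acc.reverse.map String.ofList, buf))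
        = (PySem.Chars.split₀.go (cs.filter (fun c => !removed.contains c)) buf.reverse acc).map
            String.ofList := by
  intro cs
  induction cs with
  | nil =>
      intro buf acc hbuf
      cases buf with
      | nil => simp [dsFinish, PySem.Chars.split₀.go]
      | cons b bs =>
          simp [dsFinish, PySem.Chars.split₀.go]
  | cons c rest ih =>
      intro buf acc hbuf
      by_cases hrem : removed.contains c = true
      · simp only [List.foldl_cons, List.filter_cons, hrem, dsStep,
          Bool.not_true, Bool.false_eq_true, if_false]
        exact ih buf acc hbuf
      · have hrem' : removed.contains c = false := eq_false_of_ne_true hrem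
        by_cases hsp : PySem.Chars.isspace c = true
        · cases buf with
          | nil =>
              simp only [List.foldl_cons, dsStep, hrem', Bool.false_eq_true, if_false, hsp,
                if_true, List.isEmpty_nil, List.filter_cons, Bool.not_false]
              rw [go_space _ _ _ _ hsp]
              simpa using ih [] acc (by simp)
          | cons b bs =>
              simp only [List.foldl_cons, dsStep, hrem', Bool.false_eq_true, if_false, hsp,
                if_true, List.isEmpty_cons, List.filter_cons, Bool.not_false]
              rw [go_space _ _ _ _ hsp]
              have := ih [] ((b :: bs) :: acc) (by simp)
              simp only [List.reverse_cons, List.map_append, List.map_cons, List.map_nil,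
                List.reverse_nil] at this ⊢
              simpa using this
        · have hsp' : PySem.Chars.isspace c = false := eq_false_of_ne_true hsp
          simp only [List.foldl_cons, dsStep, hrem', Bool.false_eq_true, if_false, hsp',
            List.filter_cons, Bool.not_false, if_true]
          rw [go_nonspace _ _ _ _ hsp']
          have hbuf' : ∀ x ∈ buf ++ [c], PySem.Chars.isspace x = false := by
            intro x hx
            rcases List.mem_append.mp hx with h | h
            · exact hbuf x h
            · simp at h; subst h; exact hsp'
          have := ih (buf ++ [c]) acc hbuf'
          simpa using this

theorem dsRowB_eq (removed row : List Char) :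
    dsRowB removed row
      = (PySem.Chars.split₀ (row.filter (fun c => !removed.contains c))).map String.ofList := by
  unfold dsRowB PySem.Chars.split₀
  simpa using scan_eq removed row [] [] (by simp)

theorem set_ofList_contains (xs : List Char) (c : Char) :
    List.contains (PySem.Set.ofList xs) c = List.contains xs c := by
  by_cases h : c ∈ xs
  · have : c ∈ PySem.Set.ofList xs := (PySem.Set.mem_ofList xs c).mpr h
    simp [List.contains_eq_mem, h, this]
  · have : c ∉ PySem.Set.ofList xs := fun h' => h ((PySem.Set.mem_ofList xs c).mp h')
    simp [List.contains_eq_mem, h, this]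

-- per-row equality of the two pipelines
theorem row_eq (chars : String) (row : String) :
    PySem.Str.split₀
        (dsCollapse
          (chars.toList.foldl (fun a el => PySem.Str.replace a (String.ofList [el]) "") row).toList.length
          (chars.toList.foldl (fun a el => PySem.Str.replace a (String.ofList [el]) "") row))
      = dsRowB (PySem.Set.ofList chars.toList) row.toList := by
  rw [dsRowB_eq]
  unfold PySem.Str.split₀
  congr 1
  rw [split₀_dsCollapse, pass1_toList, foldl_filter]
  congr 1
  apply List.filter_congr
  intro c _
  rw [set_ofList_contains]

-- ===== VERDICT (by name: the statement is the Claim_ definition above) =====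
theorem delete_symbols_spec : Claim_equal_delete_symbols := by
  intro stich chars _
  unfold Spec_delete_symbols
  have hA : delete_symbols stich chars = stich.map (fun row =>
      PySem.Str.split₀ (dsCollapse
        (chars.toList.foldl (fun a el => PySem.Str.replace a (String.ofList [el]) "") row).toList.length
        (chars.toList.foldl (fun a el => PySem.Str.replace a (String.ofList [el]) "") row))) := by
    simp only [delete_symbols, List.map_map]
    rfl
  have hB : delete_symbols_alt stich chars
      = stich.map (fun row => dsRowB (PySem.Set.ofList chars.toList) row.toList) := rfl
  rw [hA, hB]
  apply List.map_congr_left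
  intro row _
  exact row_eq chars row
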